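-- pv_equiv track=rewrite | github.com/jameshgrn/dgov | src/dgov/dashboard.py | format_tool_trace_activity
-- ===== SOURCE A (Python) =====
-- def format_tool_trace_activity(tool_trace: list[dict], max_lines: int = 5) -> str:
--     """Format recent tool-trace activity for dashboard preview."""
--     if not tool_trace:
--         return ""
--
--     tool_calls = [t for t in tool_trace if t.get("action_type") == "tool_call"]
--     thinking = [t for t in tool_trace if t.get("action_type") == "thinking"]
--     results = [t for t in tool_trace if t.get("action_type") == "tool_result"]
--
--     lines: list[str] = []
--
--     if tool_calls:
--         recent = tool_calls[-3:]
--         call_names = [t.get("tool_name", "unknown") for t in recent]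
--         lines.append(f"tools: {', '.join(call_names)}")
--
--     if thinking:
--         for t in thinking[-2:]:
--             thinking_text = " ".join(t.get("thinking", "").split())[:60]
--             if thinking_text:
--                 suffix = "..." if len(thinking_text) == 60 else ""
--                 lines.append(f"thought: {thinking_text}{suffix}")
--
--     if results:
--         t = results[-1]
--         status = t.get("tool_status", "")
--         result_text = " ".join(t.get("tool_result", "").split())[:50]
--         if status and result_text:
--             suffix = "..." if len(result_text) == 50 else ""
--             lines.append(f"result[{status}]: {result_text}{suffix}")
--
--     return "\n".join(lines[:max_lines]) if lines else ""
-- ===== SOURCE B (Python) =====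
-- def format_tool_trace_activity(tool_trace: list[dict], max_lines: int = 5) -> str:
--     """Format recent tool-trace activity for dashboard preview.
--
--     Single backward pass with early exit: walk the trace newest-first,
--     collecting only the last 3 tool-call names, last 2 thinking entries and
--     the last result, and stop as soon as all three quotas are full.
--     """
--     names = []      # newest-first, at most 3
--     thoughts = []   # newest-first, at most 2
--     result = None   # last tool_result entry
--     for t in reversed(tool_trace):
--         kind = t.get("action_type")
--         if kind == "tool_call":
--             if len(names) < 3:
--                 names.append(t.get("tool_name", "unknown"))
--         elif kind == "thinking":
--             if len(thoughts) < 2: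
--                 thoughts.append(t)
--         elif kind == "tool_result":
--             if result is None:
--                 result = t
--         if len(names) == 3 and len(thoughts) == 2 and result is not None:
--             break
--
--     lines = []
--     if names:
--         lines.append("tools: " + ", ".join(reversed(names)))
--     for t in reversed(thoughts):
--         text = " ".join(t.get("thinking", "").split())[:60]
--         if text:
--             lines.append("thought: " + text + ("..." if len(text) == 60 else ""))
--     if result is not None:
--         status = result.get("tool_status", "")
--         text = " ".join(result.get("tool_result", "").split())[:50]
--         if status and text:
--             lines.append("result[" + status + "]: " + text + ("..." if len(text) == 50 else ""))
--     return "\n".join(lines[:max_lines])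
-- ===== Notes on version B (the rewrite author's own statement) =====
-- stated objective: alternative
-- what changed: B replaces A's three full filtering passes and negative-index slicing by a single backward walk over the trace that accumulates only the last 3 tool-call names, last 2 thinking entries and the last result, breaking out early once all three quotas are full, then formats from those bounded accumulators.
import Mathlib
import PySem

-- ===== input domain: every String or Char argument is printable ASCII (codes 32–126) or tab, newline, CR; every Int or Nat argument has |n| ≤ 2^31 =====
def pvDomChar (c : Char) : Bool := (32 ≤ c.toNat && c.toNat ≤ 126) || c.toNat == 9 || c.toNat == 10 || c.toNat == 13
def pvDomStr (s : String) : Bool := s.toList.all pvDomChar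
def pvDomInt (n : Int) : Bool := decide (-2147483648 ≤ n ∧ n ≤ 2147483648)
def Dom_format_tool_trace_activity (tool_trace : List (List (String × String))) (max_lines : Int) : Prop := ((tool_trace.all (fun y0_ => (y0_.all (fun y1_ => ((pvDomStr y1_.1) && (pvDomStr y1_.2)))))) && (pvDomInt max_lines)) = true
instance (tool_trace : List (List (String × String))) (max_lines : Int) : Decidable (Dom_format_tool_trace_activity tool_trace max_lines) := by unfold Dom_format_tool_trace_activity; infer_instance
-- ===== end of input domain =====

-- B replaces A's three full filtering passes by ONE backward walk with early exit that
-- collects only the ≤3 call names, ≤2 thinking entries and the last result; objective: simpler.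

-- ===== PORT A =====
def format_tool_trace_activity (tool_trace : List (List (String × String))) (max_lines : Int) : String :=
  if tool_trace = [] then ""
  else
    let tool_calls := tool_trace.filter (fun t => (PySem.Dict.mk t).get? "action_type" == some "tool_call")
    let thinking := tool_trace.filter (fun t => (PySem.Dict.mk t).get? "action_type" == some "thinking")
    let results := tool_trace.filter (fun t => (PySem.Dict.mk t).get? "action_type" == some "tool_result")
    let lines : List String := []
    let lines := if tool_calls ≠ [] then
        let recent := PySem.List.slice tool_calls (some (-3)) none
        let call_names := recent.map (fun t => (PySem.Dict.mk t).getD "tool_name" "unknown")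
        lines ++ ["tools: " ++ PySem.Str.join ", " call_names]
      else lines
    let lines := if thinking ≠ [] then
        (PySem.List.slice thinking (some (-2)) none).foldl (fun acc t =>
          let thinking_text := PySem.Str.slice (PySem.Str.join " " (PySem.Str.split₀ ((PySem.Dict.mk t).getD "thinking" ""))) none (some 60)
          if thinking_text ≠ "" then
            let suffix := if PySem.Str.len thinking_text = 60 then "..." else ""
            acc ++ ["thought: " ++ thinking_text ++ suffix]
          else acc) lines
      else lines
    let lines := if results ≠ [] then
        let t := PySem.List.pyGetD results (-1) []   -- results[-1]; guarded nonempty, default unreachable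
        let status := (PySem.Dict.mk t).getD "tool_status" ""
        let result_text := PySem.Str.slice (PySem.Str.join " " (PySem.Str.split₀ ((PySem.Dict.mk t).getD "tool_result" ""))) none (some 50)
        if status ≠ "" ∧ result_text ≠ "" then
          let suffix := if PySem.Str.len result_text = 50 then "..." else ""
          lines ++ ["result[" ++ status ++ "]: " ++ result_text ++ suffix]
        else lines
      else lines
    if lines ≠ [] then PySem.Str.join "\n" (PySem.List.slice lines none (some max_lines)) else ""

-- ===== PORT B =====
-- one step of B's backward loop: update (names, thoughts, result) from entry t
def pvStep (st : List String × List (List (String × String)) × Option (List (String × String)))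
    (t : List (String × String)) :
    List String × List (List (String × String)) × Option (List (String × String)) :=
  let kind := (PySem.Dict.mk t).get? "action_type"
  if kind == some "tool_call" then
    if st.1.length < 3 then (st.1 ++ [(PySem.Dict.mk t).getD "tool_name" "unknown"], st.2.1, st.2.2) else st
  else if kind == some "thinking" then
    if st.2.1.length < 2 then (st.1, st.2.1 ++ [t], st.2.2) else st
  else if kind == some "tool_result" then
    match st.2.2 with
    | none => (st.1, st.2.1, some t)
    | some _ => st
  else st

-- B's loop over reversed(tool_trace), with Python's early `break` once all quotas are full
def pvLoop : List (List (String × String)) →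
    (List String × List (List (String × String)) × Option (List (String × String))) →
    (List String × List (List (String × String)) × Option (List (String × String)))
  | [], st => st
  | t :: rest, st =>
    let st' := pvStep st t
    if st'.1.length = 3 ∧ st'.2.1.length = 2 ∧ st'.2.2.isSome then st' else pvLoop rest st'

def format_tool_trace_activity_alt (tool_trace : List (List (String × String))) (max_lines : Int) : String :=
  let st := pvLoop tool_trace.reverse ([], [], none)
  let names := st.1
  let thoughts := st.2.1
  let result := st.2.2
  let lines : List String := []
  let lines := if names ≠ [] then lines ++ ["tools: " ++ PySem.Str.join ", " names.reverse] else lines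
  let lines := thoughts.reverse.foldl (fun acc t =>
      let text := PySem.Str.slice (PySem.Str.join " " (PySem.Str.split₀ ((PySem.Dict.mk t).getD "thinking" ""))) none (some 60)
      if text ≠ "" then acc ++ ["thought: " ++ text ++ (if PySem.Str.len text = 60 then "..." else "")] else acc) lines
  let lines := match result with
    | some t =>
      let status := (PySem.Dict.mk t).getD "tool_status" ""
      let text := PySem.Str.slice (PySem.Str.join " " (PySem.Str.split₀ ((PySem.Dict.mk t).getD "tool_result" ""))) none (some 50)
      if status ≠ "" ∧ text ≠ "" then
        lines ++ ["result[" ++ status ++ "]: " ++ text ++ (if PySem.Str.len text = 50 then "..." else "")]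
      else lines
    | none => lines
  PySem.Str.join "\n" (PySem.List.slice lines none (some max_lines))

-- ===== PRECONDITION & SPEC =====
def Spec_format_tool_trace_activity (tool_trace : List (List (String × String))) (max_lines : Int) (out : String) : Prop := out = format_tool_trace_activity_alt tool_trace max_lines
instance (tool_trace : List (List (String × String))) (max_lines : Int) (out : String) : Decidable (Spec_format_tool_trace_activity tool_trace max_lines out) := by unfold Spec_format_tool_trace_activity; infer_instance

-- ===== CLAIM (what is proved, stated in full; the proofs are below) =====
def Claim_equal_format_tool_trace_activity : Prop := ∀ (tool_trace : List (List (String × String))) (max_lines : Int), Dom_format_tool_trace_activity tool_trace max_lines → Spec_format_tool_trace_activity tool_trace max_lines (format_tool_trace_activity tool_trace max_lines)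

-- ===== LEMMAS AND PROOFS =====

-- once every quota is full, a step does nothing
theorem pvStep_full (st : List String × List (List (String × String)) × Option (List (String × String)))
    (t : List (String × String)) (h1 : ¬ st.1.length < 3) (h2 : ¬ st.2.1.length < 2)
    (h3 : st.2.2.isSome) : pvStep st t = st := by
  unfold pvStep
  obtain ⟨x, hx⟩ := Option.isSome_iff_exists.mp h3
  split_ifs; simp_all

theorem pvLoop_eq_foldl (m : List (List (String × String)))
    (st : List String × List (List (String × String)) × Option (List (String × String))) :
    pvLoop m st = m.foldl pvStep st := by
  induction m generalizing st with
  | nil => rfl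
  | cons t rest ih =>
    unfold pvLoop
    by_cases hb : (pvStep st t).1.length = 3 ∧ (pvStep st t).2.1.length = 2 ∧ (pvStep st t).2.2.isSome
    · simp only [hb, List.foldl_cons]
      have : ∀ (l : List (List (String × String)))
          (s : List String × List (List (String × String)) × Option (List (String × String))),
          s.1.length = 3 → s.2.1.length = 2 → s.2.2.isSome → l.foldl pvStep s = s := by
        intro l
        induction l with
        | nil => intro s _ _ _; rfl
        | cons a l ihl =>
          intro s hs1 hs2 hs3
          simp only [List.foldl_cons, pvStep_full s a (by omega) (by omega) hs3]
          exact ihl s hs1 hs2 hs3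
      exact (this rest _ hb.1 hb.2.1 hb.2.2).symm
    · simp only [hb, if_false, List.foldl_cons, ih]

-- characterisation of the backward loop as take/head? of the three filters
theorem pvFold_char (m : List (List (String × String))) (ns : List String)
    (ths : List (List (String × String))) (r : Option (List (String × String))) :
    m.foldl pvStep (ns, ths, r) =
      (ns ++ ((m.filter (fun t => (PySem.Dict.mk t).get? "action_type" == some "tool_call")).map
          (fun t => (PySem.Dict.mk t).getD "tool_name" "unknown")).take (3 - ns.length),
       ths ++ (m.filter (fun t => (PySem.Dict.mk t).get? "action_type" == some "thinking")).take (2 - ths.length),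
       r.or (m.filter (fun t => (PySem.Dict.mk t).get? "action_type" == some "tool_result")).head?) := by
  induction m generalizing ns ths r with
  | nil => cases r <;> simp
  | cons t m ih =>
    simp only [List.foldl_cons, List.filter_cons]
    by_cases hc : (PySem.Dict.mk t).get? "action_type" = some "tool_call"
    · by_cases hn : ns.length < 3
      · have h3 : 3 - ns.length = (3 - (ns.length + 1)) + 1 := by omega
        simp [pvStep, hc, hn, ih, h3, List.take_succ_cons]
      · have h0 : 3 - ns.length = 0 := by omega
        simp [pvStep, hc, hn, ih, h0]
    · by_cases ht : (PySem.Dict.mk t).get? "action_type" = some "thinking"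
      · by_cases hn : ths.length < 2
        · have h2 : 2 - ths.length = (2 - (ths.length + 1)) + 1 := by omega
          simp [pvStep, ht, hn, ih, h2, List.take_succ_cons]
        · have h0 : 2 - ths.length = 0 := by omega
          simp [pvStep, ht, hn, ih, h0]
      · by_cases hr : (PySem.Dict.mk t).get? "action_type" = some "tool_result"
        · cases r with
          | none => simp [pvStep, hr, ih]
          | some x => simp [pvStep, hr, ih]
        · simp [pvStep, hc, ht, hr, ih]

-- last-k of a list as reverse/take/reverse
theorem pv_rev_take (L : List String) (k : Nat) :
    (L.reverse.take k).reverse = L.drop (L.length - k) := by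
  rw [List.take_reverse, List.reverse_reverse]

theorem pv_rev_take' (L : List (List (String × String))) (k : Nat) :
    (L.reverse.take k).reverse = L.drop (L.length - k) := by
  rw [List.take_reverse, List.reverse_reverse]

-- A's 'if thinking' guard around the thought loop is redundant: the loop over [] is a no-op
theorem pv_think_guard (th : List (List (String × String))) (lines : List String)
    (f : List String → List (String × String) → List String) :
    (if th ≠ [] then (PySem.List.slice th (some (-2)) none).foldl f lines else lines)
    = (PySem.List.slice th (some (-2)) none).foldl f lines := by
  by_cases hth : th = []
  · subst hth; simp [PySem.List.slice]
  · simp [hth]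

-- A's trailing 'if lines' guard is redundant: joining the slice of [] is ""
theorem pv_final (ml : Int) (L : List String) :
    (if L ≠ [] then PySem.Str.join "\n" (PySem.List.slice L none (some ml)) else "")
    = PySem.Str.join "\n" (PySem.List.slice L none (some ml)) := by
  by_cases hL : L = []
  · subst hL; simp [PySem.List.slice]; rfl
  · simp [hL]

-- ===== VERDICT (by name: the statement is the Claim_ definition above) =====
theorem format_tool_trace_activity_spec : Claim_equal_format_tool_trace_activity := by
  intro tt ml _
  unfold Spec_format_tool_trace_activity format_tool_trace_activity format_tool_trace_activity_alt
  by_cases h0 : tt = []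
  · subst h0
    simp [pvLoop, PySem.List.slice]
    rfl
  · simp only [if_neg h0, pvLoop_eq_foldl, pvFold_char, List.filter_reverse, List.nil_append,
      List.length_nil, Nat.sub_zero, Option.or]
    -- names / thoughts / result in terms of the forward filters
    set fc := tt.filter (fun t => (PySem.Dict.mk t).get? "action_type" == some "tool_call") with hfc
    set ft := tt.filter (fun t => (PySem.Dict.mk t).get? "action_type" == some "thinking") with hft
    set fr := tt.filter (fun t => (PySem.Dict.mk t).get? "action_type" == some "tool_result") with hfr
    have hnames : ((((fc.map (fun t => (PySem.Dict.mk t).getD "tool_name" "unknown")).reverse).take 3).reverse)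
        = (PySem.List.slice fc (some (-3)) none).map (fun t => (PySem.Dict.mk t).getD "tool_name" "unknown") := by
      rw [pv_rev_take, PySem.List.slice_from_neg_ofNat fc 3 (by omega),
        List.map_drop, List.length_map]
    have hths : ((ft.reverse.take 2).reverse) = PySem.List.slice ft (some (-2)) none := by
      rw [pv_rev_take', PySem.List.slice_from_neg_ofNat ft 2 (by omega)]
    have hguard : (((fc.map (fun t => (PySem.Dict.mk t).getD "tool_name" "unknown")).reverse).take 3 = [])
        ↔ fc = [] := by
      constructor
      · intro h
        by_contra hne
        have : (fc.map (fun t => (PySem.Dict.mk t).getD "tool_name" "unknown")).reverse ≠ [] := by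
          simp [hne]
        rcases List.exists_cons_of_ne_nil this with ⟨a, l, hl⟩
        simp [hl] at h
      · intro h; simp [h]
    rw [pv_think_guard, pv_final]
    by_cases hfce : fc = []
    · by_cases hfre : fr = []
      · simp [hfce, hfre, hths]
      · have hlast : fr.reverse.head? = some (fr.getLast hfre) := by
          rw [List.head?_reverse]; exact List.getLast?_eq_some_getLast hfre
        have hget : PySem.List.pyGetD fr (-1) [] = fr.getLast hfre :=
          PySem.List.pyGetD_neg_one fr [] hfre
        simp [hfce, hfre, hths, hlast, hget]
    · have hg2 : ((fc.map (fun t => (PySem.Dict.mk t).getD "tool_name" "unknown")).reverse).take 3 ≠ [] :=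
        fun h => hfce (hguard.mp h)
      by_cases hfre : fr = []
      · simp [hfce, hfre, hnames, hths]
      · have hlast : fr.reverse.head? = some (fr.getLast hfre) := by
          rw [List.head?_reverse]; exact List.getLast?_eq_some_getLast hfre
        have hget : PySem.List.pyGetD fr (-1) [] = fr.getLast hfre :=
          PySem.List.pyGetD_neg_one fr [] hfre
        simp [hfce, hfre, hnames, hths, hlast, hget]
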